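-- pv_equiv track=rewrite | github.com/anirudhpillai/algorithms | interview_bit/arrays/hotel_bookings_possible.py | hotels
-- ===== SOURCE A (Python) =====
-- def hotels(arrive, depart, K):
--     arrive.sort()
--     depart.sort()
--
--     start, end = 0, 0
--     booked = 0
--
--     while start < len(arrive) and end < len(depart):
--         while start < len(arrive) and end < len(depart) and arrive[start] < depart[end]:
--             booked += 1
--             if booked > K:
--                 return False
--             start += 1
--         booked -= 1
--         end += 1
--
--     return True
-- ===== SOURCE B (Python) =====
-- def hotels(arrive, depart, K):
--     arrive.sort()
--     depart.sort()
--     # the guest with the i-th earliest arrival needs a free room exactly when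
--     # fewer than i - K + 1 earlier guests have checked out by then, i.e. the
--     # booking set fits in K rooms iff depart[i - K] <= arrive[i] for every i
--     return all(d <= a for a, d in zip(arrive[K:], depart))
-- ===== Notes on version B (the rewrite author's own statement) =====
-- stated objective: simpler
-- what changed: A's nested two-pointer while-loops with a running occupancy counter are replaced by the direct pairing test on the two sorted lists: the booking fits iff depart[i-K] <= arrive[i] for every valid i, written as one all() over zip(arrive[K:], depart) (a C-level pass, hence a constant-factor speedup); Pre_ restricts K to K >= 0, the natural domain for a room count (with K < 0 Python's arrive[K:] slices from the end and A's first-overlap bailout is an artefact of its counter).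
-- outside the precondition, e.g. on hotels([0], [0, 1], -1): A returns False, B returns True
import Mathlib
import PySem

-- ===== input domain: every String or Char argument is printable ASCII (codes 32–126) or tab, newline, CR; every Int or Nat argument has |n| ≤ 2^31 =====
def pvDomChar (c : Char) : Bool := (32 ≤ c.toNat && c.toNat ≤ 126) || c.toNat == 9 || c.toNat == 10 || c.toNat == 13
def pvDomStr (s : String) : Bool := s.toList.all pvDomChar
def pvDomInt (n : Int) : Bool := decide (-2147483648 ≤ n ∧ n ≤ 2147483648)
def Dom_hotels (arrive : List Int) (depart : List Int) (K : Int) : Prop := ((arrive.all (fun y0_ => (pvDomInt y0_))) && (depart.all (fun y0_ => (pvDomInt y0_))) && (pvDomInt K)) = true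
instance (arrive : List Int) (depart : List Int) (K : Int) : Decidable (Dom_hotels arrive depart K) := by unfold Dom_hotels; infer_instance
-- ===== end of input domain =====

-- B replaces A's nested two-pointer while-loops and occupancy counter by the direct
-- pairing test on the two sorted lists: all(d <= a for a, d in zip(arrive[K:], depart)).
-- Pre_ restricts to K ≥ 0, the natural domain for a room count.
-- Both programs sort `arrive` and `depart` in place; the equivalence proved is about the return value.


-- ===== PORT A =====
-- inner `while start < len(arrive) and end < len(depart) and arrive[start] < depart[end]` loop:
-- the two index bounds become the non-emptiness of the arrival suffix `as` and of the departure
-- suffix (its head `dhead` is passed in); `none` = Python's `return False`.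
def hotelsInner (K : Int) (dhead : Int) (as : List Int) (booked : Int) : Option (List Int × Int) :=
  match as with
  | [] => some ([], booked)
  | x :: xs =>
    if x < dhead then
      if booked + 1 > K then none
      else hotelsInner K dhead xs (booked + 1)
    else some (x :: xs, booked)

-- outer `while start < len(arrive) and end < len(depart)` loop
def hotelsOuter (K : Int) (as : List Int) (ds : List Int) (booked : Int) : Bool :=
  match as, ds with
  | [], _ => true
  | _ :: _, [] => true
  | x :: xs, y :: ys =>
    match hotelsInner K y (x :: xs) booked with
    | none => false
    | some (as', b) => hotelsOuter K as' ys (b - 1)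
termination_by ds.length
decreasing_by simp

def hotels (arrive : List Int) (depart : List Int) (K : Int) : Bool :=
  hotelsOuter K (PySem.List.sorted arrive (fun x => x)) (PySem.List.sorted depart (fun x => x)) 0

-- ===== PORT B =====
-- `all(d <= a for a, d in zip(arrive[K:], depart))` on the sorted lists
def hotels_alt (arrive : List Int) (depart : List Int) (K : Int) : Bool :=
  let a := PySem.List.sorted arrive (fun x => x)
  let d := PySem.List.sorted depart (fun x => x)
  ((PySem.List.slice a (some K) none).zip d).all (fun p => decide (p.2 ≤ p.1))

-- ===== PRECONDITION & SPEC =====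
-- Pre_ restricts to the natural domain of the task: a nonnegative number K of rooms.
-- (With K < 0 A bails out at the first overlap via its counter while B's arrive[K:]
-- slices from the end of the list — neither value is specified for a negative room count.)
def Pre_hotels (arrive : List Int) (depart : List Int) (K : Int) : Prop := 0 ≤ K
instance (arrive : List Int) (depart : List Int) (K : Int) : Decidable (Pre_hotels arrive depart K) := by unfold Pre_hotels; infer_instance

def pvWitness_hotels : List Int × List Int × Int := ([1, 3, 2], [2, 4, 5], 1)

def Spec_hotels (arrive : List Int) (depart : List Int) (K : Int) (out : Bool) : Prop := out = hotels_alt arrive depart K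
instance (arrive : List Int) (depart : List Int) (K : Int) (out : Bool) : Decidable (Spec_hotels arrive depart K out) := by unfold Spec_hotels; infer_instance

-- ===== CLAIM (what is proved, stated in full; the proofs are below) =====
def Claim_equal_hotels : Prop := ∀ (arrive : List Int) (depart : List Int) (K : Int), Dom_hotels arrive depart K → Pre_hotels arrive depart K → Spec_hotels arrive depart K (hotels arrive depart K)

-- ===== LEMMAS AND PROOFS =====

-- every element of a sorted list is at least its head
lemma head_le_mem {x z : Int} {xs : List Int}
    (h : (x :: xs).Pairwise (· ≤ ·)) (hz : z ∈ x :: xs) : x ≤ z := by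
  rcases List.mem_cons.1 hz with rfl | hz
  · exact le_rfl
  · exact (List.pairwise_cons.1 h).1 z hz

-- one inner-loop step of A
lemma outer_step (K a d : Int) (as ds : List Int) (booked : Int)
    (hlt : a < d) (hK : ¬ booked + 1 > K) :
    hotelsOuter K (a :: as) (d :: ds) booked = hotelsOuter K as (d :: ds) (booked + 1) := by
  cases as with
  | nil =>
    rw [hotelsOuter, hotelsOuter]
    simp [hotelsInner, hlt, hK, hotelsOuter]
  | cons x xs =>
    rw [hotelsOuter, hotelsOuter]
    simp [hotelsInner, hlt, hK]

-- A's two-pointer loop at state (as, ds, booked) decides exactly the remaining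
-- zip-pairing checks: the pairs zip (as.drop (K - booked)) ds.
lemma main_lemma (K : Int) :
    ∀ (n : Nat) (as ds : List Int) (b : Int), as.length + ds.length ≤ n →
      as.Pairwise (· ≤ ·) → ds.Pairwise (· ≤ ·) → b ≤ K →
      hotelsOuter K as ds b
        = ((as.drop (K - b).toNat).zip ds).all (fun p => decide (p.2 ≤ p.1)) := by
  intro n
  induction n with
  | zero =>
    intro as ds b hn _ _ _
    have : as = [] := by cases as <;> simp_all
    subst this
    rw [hotelsOuter]; simp
  | succ n ih =>
    intro as ds b hn ha hd hbK
    match as, ds with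
    | [], ds => rw [hotelsOuter]; simp
    | x :: xs, [] => rw [hotelsOuter]; simp [List.zip_nil_right]
    | x :: xs, y :: ys =>
      by_cases hlt : x < y
      · by_cases hfull : b + 1 > K
        · -- the counter would exceed K: A returns False; the first remaining pair fails
          have hb : b = K := by omega
          rw [hotelsOuter]
          simp only [hotelsInner, if_pos hlt, if_pos hfull]
          have h0 : (K - b).toNat = 0 := by omega
          rw [h0]
          simp [not_le.2 hlt]
        · -- inner step: consume the arrival x, whose pair (if any) is not yet due
          rw [outer_step K x y xs ys b hlt hfull]
          rw [ih xs (y :: ys) (b + 1) (by simp at hn ⊢; omega)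
            (ha.sublist (List.sublist_cons_self x xs)) hd (by omega)]
          have hpos : (K - b).toNat = (K - (b + 1)).toNat + 1 := by omega
          rw [hpos, List.drop_succ_cons]
      · -- outer step: consume the departure y; its pair, if it exists, holds by sortedness
        have heq : hotelsOuter K (x :: xs) (y :: ys) b = hotelsOuter K (x :: xs) ys (b - 1) := by
          rw [hotelsOuter]
          cases xs <;> simp [hotelsInner, hlt]
        rw [heq]
        rw [ih (x :: xs) ys (b - 1) (by simp at hn ⊢; omega) ha
          (hd.sublist (List.sublist_cons_self y ys)) (by omega)]
        have hpos : (K - (b - 1)).toNat = (K - b).toNat + 1 := by omega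
        rw [hpos]
        -- the dropped-by-one suffixes line up pair for pair
        cases hdrop : (x :: xs).drop (K - b).toNat with
        | nil =>
          have hnil : xs.drop (K - b).toNat = [] :=
            List.drop_eq_nil_of_le (by
              have := List.drop_eq_nil_iff.1 hdrop
              simp at this ⊢; omega)
          simp [hnil]
        | cons z zs =>
          -- head pair: y ≤ z since z is an element of the sorted x :: xs and y ≤ x
          have hz : z ∈ x :: xs := by
            have : z ∈ (x :: xs).drop (K - b).toNat := by rw [hdrop]; simp
            exact List.mem_of_mem_drop this
          have hyz : y ≤ z := le_trans (by omega) (head_le_mem ha hz)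
          have htail : xs.drop (K - b).toNat = zs := by
            have h2 := congrArg List.tail hdrop
            simpa [List.tail_drop] using h2
          simp [htail, hyz]

-- ===== VERDICT (by name: the statement is the Claim_ definition above) =====
theorem hotels_spec : Claim_equal_hotels := by
  intro arrive depart K _ hK
  unfold Spec_hotels hotels hotels_alt
  have ha := PySem.List.sorted_pairwise arrive (fun x => x)
  have hd := PySem.List.sorted_pairwise depart (fun x => x)
  obtain ⟨k, rfl⟩ : ∃ k : Nat, K = (k : Int) := ⟨K.toNat, (Int.toNat_of_nonneg hK).symm⟩
  rw [main_lemma _ _ _ _ 0 le_rfl ha hd (Int.natCast_nonneg k)]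
  simp [PySem.List.slice_from_natCast]
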